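-- pv_equiv track=rewrite | github.com/giovinco0807/pineapple | ai/engine/game_engine.py | get_top_royalty
-- ===== SOURCE A (Python) =====
-- from collections import Counter
-- from typing import Dict, List, Optional, Tuple
--
-- RANK_VALUES = {'2': 2, '3': 3, '4': 4, '5': 5, '6': 6, '7': 7, '8': 8,
--                '9': 9, 'T': 10, 'J': 11, 'Q': 12, 'K': 13, 'A': 14}
--
-- def get_top_royalty(cards: List[str]) -> int:
--     """Top row: 66=1, 77=2, ..., AA=9. Trips: 222=10, ..., AAA=22."""
--     ranks = []
--     jokers = 0
--     for c in cards:
--         if c in ("X1", "X2"):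
--             jokers += 1
--         else:
--             ranks.append(RANK_VALUES.get(c[0], 0))
--     rank_counts = Counter(ranks)
--
--     best = 0
--     for r in sorted(rank_counts.keys(), reverse=True):
--         count = rank_counts[r]
--         if count + jokers >= 3:
--             return 10 + (r - 2)
--         if count + jokers >= 2 and r >= 6:
--             best = max(best, r - 5)
--     return best
-- ===== SOURCE B (Python) =====
-- from typing import List
--
-- RANK_VALUES = {'2': 2, '3': 3, '4': 4, '5': 5, '6': 6, '7': 7, '8': 8,
--                '9': 9, 'T': 10, 'J': 11, 'Q': 12, 'K': 13, 'A': 14}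
--
--
-- def get_top_royalty(cards: List[str]) -> int:
--     """Top row: 66=1, 77=2, ..., AA=9. Trips: 222=10, ..., AAA=22.
--
--     One pass tracking the highest rank reaching each multiplicity (1, 2, 3),
--     then a case split on the joker count picks which tracker decides."""
--     seen = {}
--     m1 = m2 = m3 = None
--     jokers = 0
--     for c in cards:
--         if c in ("X1", "X2"):
--             jokers += 1
--             continue
--         r = RANK_VALUES.get(c[0], 0)
--         k = seen.get(r, 0) + 1
--         seen[r] = k
--         if k == 1 and (m1 is None or r > m1):
--             m1 = r
--         elif k == 2 and (m2 is None or r > m2):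
--             m2 = r
--         elif k == 3 and (m3 is None or r > m3):
--             m3 = r
--     trip = m1 if jokers >= 2 else (m2 if jokers == 1 else m3)
--     if trip is not None:
--         return 10 + trip - 2
--     pair = m1 if jokers >= 1 else m2
--     if pair is not None and pair >= 6:
--         return pair - 5
--     return 0
-- ===== Notes on version B (the rewrite author's own statement) =====
-- stated objective: alternative
-- what changed: Replaces A's Counter + descending sort of keys + early-return scan by a single pass that maintains running maxima m1/m2/m3 (the highest rank seen at least once/twice/three times) plus the joker count, and then decides the score by a closed case split on jokers (>=2 uses m1, ==1 uses m2, ==0 uses m3 for trips; m1/m2 for pairs) with no sort and no post-loop over rank keys.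
import Mathlib
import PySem

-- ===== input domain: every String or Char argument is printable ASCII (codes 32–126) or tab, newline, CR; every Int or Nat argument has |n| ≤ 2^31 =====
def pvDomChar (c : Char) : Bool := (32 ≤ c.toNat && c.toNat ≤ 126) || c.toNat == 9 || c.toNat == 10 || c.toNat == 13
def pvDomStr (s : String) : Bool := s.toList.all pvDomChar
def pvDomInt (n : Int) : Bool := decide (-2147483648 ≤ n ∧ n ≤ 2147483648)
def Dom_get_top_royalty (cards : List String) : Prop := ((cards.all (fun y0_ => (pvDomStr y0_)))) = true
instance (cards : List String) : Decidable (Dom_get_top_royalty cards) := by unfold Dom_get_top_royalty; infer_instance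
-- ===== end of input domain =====

-- ===== PORT A =====
-- B replaces A's Counter + descending key sort + early-return scan by ONE pass that
-- tracks the highest rank reaching multiplicity 1/2/3 and a closed joker case split
-- (objective: alternative).
-- RANK_VALUES.get(c[0], 0)
def RANK_VALUES : PySem.Dict Char Int :=
  PySem.Dict.ofList [('2', 2), ('3', 3), ('4', 4), ('5', 5), ('6', 6), ('7', 7), ('8', 8),
                     ('9', 9), ('T', 10), ('J', 11), ('Q', 12), ('K', 13), ('A', 14)]

-- c[0]; the `none` case (empty string, Python IndexError) is excluded by Pre_
def pvCard0 (c : String) : Char := (PySem.Str.pyGet? c 0).getD ' '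

def pvIsJoker (c : String) : Bool := c = "X1" ∨ c = "X2"

-- the for-loop over sorted(rank_counts.keys(), reverse=True) with its early return
def pvA_loop (jokers : Int) (counts : PySem.Dict Int Int) : List Int → Int → Int
  | [], best => best
  | r :: rs, best =>
    let count := counts.getD r 0
    if count + jokers ≥ 3 then 10 + (r - 2)
    else if count + jokers ≥ 2 ∧ r ≥ 6 then pvA_loop jokers counts rs (max best (r - 5))
    else pvA_loop jokers counts rs best

def get_top_royalty (cards : List String) : Int :=
  let st := cards.foldl (fun (st : List Int × Int) c =>
    (if pvIsJoker c then st.1 else st.1 ++ [RANK_VALUES.getD (pvCard0 c) 0],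
     if pvIsJoker c then st.2 + 1 else st.2)) ([], 0)
  let rank_counts := PySem.Dict.counter st.1
  pvA_loop st.2 rank_counts (PySem.List.sorted rank_counts.keys (fun x => x) true) 0

-- ===== PORT B =====
-- loop state of Source B: seen dict, m1/m2/m3 running maxima, joker count
structure PvBSt where
  d : PySem.Dict Int Int
  m1 : Option Int
  m2 : Option Int
  m3 : Option Int
  jok : Int
  deriving Repr, DecidableEq

-- `m is None or r > m` update: new maximum candidate
def pvUpd (m : Option Int) (r : Int) : Option Int :=
  match m with
  | none => some r
  | some v => if r > v then some r else some v

-- one iteration of Source B's loop; the Python elif arms are mutually exclusive on k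
-- (k equals at most one of 1, 2, 3), so they are three independent guarded updates
def pvBStep (st : PvBSt) (c : String) : PvBSt :=
  if pvIsJoker c then { st with jok := st.jok + 1 }
  else
    let r := RANK_VALUES.getD (pvCard0 c) 0
    let k := st.d.getD r 0 + 1
    { d := st.d.insert r k
      m1 := if k = 1 then pvUpd st.m1 r else st.m1
      m2 := if k = 2 then pvUpd st.m2 r else st.m2
      m3 := if k = 3 then pvUpd st.m3 r else st.m3
      jok := st.jok }

def get_top_royalty_alt (cards : List String) : Int :=
  let st := cards.foldl pvBStep ⟨PySem.Dict.empty, none, none, none, 0⟩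
  let trip := if st.jok ≥ 2 then st.m1 else if st.jok = 1 then st.m2 else st.m3
  match trip with
  | some t => 10 + t - 2
  | none =>
    let pair := if st.jok ≥ 1 then st.m1 else st.m2
    match pair with
    | some p => if p ≥ 6 then p - 5 else 0
    | none => 0

-- ===== PRECONDITION & SPEC =====
-- Pre_ excludes only inputs on which Python A raises: a non-joker card that is the empty
-- string makes `c[0]` an IndexError (B raises there too).
def Pre_get_top_royalty (cards : List String) : Prop :=
  ∀ c ∈ cards, c ≠ ""
instance (cards : List String) : Decidable (Pre_get_top_royalty cards) := by
  unfold Pre_get_top_royalty; infer_instance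
def pvWitness_get_top_royalty : List String := ["6h", "6d", "X1"]
def Spec_get_top_royalty (cards : List String) (out : Int) : Prop := out = get_top_royalty_alt cards
instance (cards : List String) (out : Int) : Decidable (Spec_get_top_royalty cards out) := by unfold Spec_get_top_royalty; infer_instance

-- ===== CLAIM (what is proved, stated in full; the proofs are below) =====
def Claim_equal_get_top_royalty : Prop := ∀ (cards : List String), Dom_get_top_royalty cards → Pre_get_top_royalty cards → Spec_get_top_royalty cards (get_top_royalty cards)

-- ===== LEMMAS AND PROOFS =====

-- the non-joker rank list both programs extract from the cards
def pvRanksOf (cards : List String) : List Int :=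
  (cards.filter (fun c => !pvIsJoker c)).map (fun c => RANK_VALUES.getD (pvCard0 c) 0)

-- "m is the maximum element of l occurring at least k times (none if there is none)"
def pvIsMQ (k : Nat) (l : List Int) : Option Int → Prop
  | none => ∀ r ∈ l, l.count r < k
  | some v => v ∈ l ∧ k ≤ l.count v ∧ ∀ r ∈ l, k ≤ l.count r → r ≤ v

-- A's loop over any key list: the first trip key wins, else a running max over pair keys.
theorem pvA_loop_eq (jokers : Int) (counts : PySem.Dict Int Int) (ks : List Int) (best : Int) :
    pvA_loop jokers counts ks best =
      match ks.filter (fun r => decide (counts.getD r 0 + jokers ≥ 3)) with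
      | t :: _ => 10 + (t - 2)
      | [] => ((ks.filter (fun r => decide (counts.getD r 0 + jokers ≥ 2 ∧ r ≥ 6))).foldl
          (fun b r => max b (r - 5)) best) := by
  induction ks generalizing best with
  | nil => simp [pvA_loop]
  | cons r rs ih =>
    by_cases h3 : counts.getD r 0 + jokers ≥ 3
    · simp [pvA_loop, h3]
    · by_cases h2 : counts.getD r 0 + jokers ≥ 2 ∧ r ≥ 6
      · simp [pvA_loop, h3, h2, ih]
      · simp [pvA_loop, h3, h2, ih]

theorem pvIsMQ_step (k : Nat) (hk : 1 ≤ k) (l : List Int) (r : Int) (m : Option Int)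
    (h : pvIsMQ k l m) :
    pvIsMQ k (l ++ [r]) (if l.count r + 1 = k then pvUpd m r else m) := by
  have hcount : ∀ x : Int, (l ++ [r]).count x = l.count x + if x = r then 1 else 0 := by
    intro x
    by_cases hx : x = r <;>
      simp [List.count_append, hx, Ne.symm]
  have hmem_of : ∀ x : Int, x ∈ l ++ [r] → x ≠ r → x ∈ l := by
    intro x hx hxr
    rcases List.mem_append.mp hx with h' | h'
    · exact h'
    · simp at h'; exact absurd h' hxr
  by_cases hek : l.count r + 1 = k
  · rw [if_pos hek]
    cases m with
    | none =>
      show pvIsMQ k (l ++ [r]) (some r)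
      simp only [pvIsMQ] at h ⊢
      refine ⟨List.mem_append_right _ (by simp), by rw [hcount, if_pos rfl]; omega, ?_⟩
      intro x hx hcx
      by_cases hxr : x = r
      · exact le_of_eq hxr
      · exfalso
        have hxl : x ∈ l := hmem_of x hx hxr
        rw [hcount, if_neg hxr] at hcx
        have := h x hxl
        omega
    | some v =>
      simp only [pvIsMQ] at h
      obtain ⟨hvl, hvc, hmax⟩ := h
      have hvr : v ≠ r := by
        intro hvr; rw [hvr] at hvc; omega
      have hupd : pvUpd (some v) r = some (max v r) := by
        simp only [pvUpd]
        by_cases hlt : r > v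
        · rw [if_pos hlt, max_eq_right (le_of_lt hlt)]
        · rw [if_neg hlt, max_eq_left (by omega)]
      rw [hupd]
      simp only [pvIsMQ]
      refine ⟨?_, ?_, ?_⟩
      · rcases le_or_gt r v with hle | hlt
        · rw [max_eq_left hle]; exact List.mem_append_left _ hvl
        · rw [max_eq_right (le_of_lt hlt)]; exact List.mem_append_right _ (by simp)
      · rcases le_or_gt r v with hle | hlt
        · rw [max_eq_left hle, hcount, if_neg hvr]; omega
        · rw [max_eq_right (le_of_lt hlt), hcount, if_pos rfl]; omega
      · intro x hx hcx
        by_cases hxr : x = r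
        · subst hxr; exact le_max_right _ _
        · have hxl : x ∈ l := hmem_of x hx hxr
          rw [hcount, if_neg hxr] at hcx
          exact le_trans (hmax x hxl (by omega)) (le_max_left _ _)
  · rw [if_neg hek]
    cases m with
    | none =>
      simp only [pvIsMQ] at h ⊢
      intro x hx
      rw [hcount]
      by_cases hxr : x = r
      · subst hxr
        rw [if_pos rfl]
        by_cases hrl : x ∈ l
        · have := h x hrl; omega
        · have : l.count x = 0 := List.count_eq_zero.mpr hrl
          omega
      · rw [if_neg hxr]
        have hxl : x ∈ l := hmem_of x hx hxr
        have := h x hxl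
        omega
    | some v =>
      simp only [pvIsMQ] at h ⊢
      obtain ⟨hvl, hvc, hmax⟩ := h
      refine ⟨List.mem_append_left _ hvl, by rw [hcount]; split <;> omega, ?_⟩
      intro x hx hcx
      rw [hcount] at hcx
      by_cases hxr : x = r
      · subst hxr
        rw [if_pos rfl] at hcx
        have hcnt : k ≤ l.count x := by omega
        have hxl : x ∈ l := List.count_pos_iff.mp (by omega)
        exact hmax x hxl hcnt
      · have hxl : x ∈ l := hmem_of x hx hxr
        rw [if_neg hxr] at hcx
        exact hmax x hxl (by omega)

def pvInv (l : List Int) (st : PvBSt) : Prop :=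
  (∀ r : Int, st.d.getD r 0 = (l.count r : Int)) ∧
  pvIsMQ 1 l st.m1 ∧ pvIsMQ 2 l st.m2 ∧ pvIsMQ 3 l st.m3

theorem pvB_fold (cards : List String) : ∀ (l : List Int) (st : PvBSt),
    pvInv l st →
    pvInv (l ++ pvRanksOf cards) (cards.foldl pvBStep st) ∧
    (cards.foldl pvBStep st).jok = st.jok + (cards.countP pvIsJoker : Int) := by
  induction cards with
  | nil => intro l st h; simpa [pvRanksOf] using h
  | cons c cs ih =>
    intro l st h
    by_cases hj : pvIsJoker c
    · have hr : pvRanksOf (c :: cs) = pvRanksOf cs := by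
        simp [pvRanksOf, hj]
      have hstep : pvBStep st c = { st with jok := st.jok + 1 } := by
        simp [pvBStep, hj]
      have hinv : pvInv l { st with jok := st.jok + 1 } := h
      obtain ⟨h1, h2⟩ := ih l _ hinv
      constructor
      · rw [hr, List.foldl_cons, hstep]
        exact h1
      · rw [List.foldl_cons, hstep, h2]
        simp [hj]
        ring
    · obtain ⟨hd, h1, h2, h3⟩ := h
      generalize hrg : RANK_VALUES.getD (pvCard0 c) 0 = r
      have hr : pvRanksOf (c :: cs) = r :: pvRanksOf cs := by
        simp [pvRanksOf, hj, hrg]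
      have e1 : (st.d.getD r 0 + 1 = (1 : Int)) = (l.count r + 1 = 1) := by
        rw [hd]; apply propext; omega
      have e2 : (st.d.getD r 0 + 1 = (2 : Int)) = (l.count r + 1 = 2) := by
        rw [hd]; apply propext; omega
      have e3 : (st.d.getD r 0 + 1 = (3 : Int)) = (l.count r + 1 = 3) := by
        rw [hd]; apply propext; omega
      have hbs : pvBStep st c = (⟨st.d.insert r (st.d.getD r 0 + 1),
          if l.count r + 1 = 1 then pvUpd st.m1 r else st.m1,
          if l.count r + 1 = 2 then pvUpd st.m2 r else st.m2,
          if l.count r + 1 = 3 then pvUpd st.m3 r else st.m3,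
          st.jok⟩ : PvBSt) := by
        simp only [pvBStep, hj, Bool.false_eq_true, if_false, hrg, e1, e2, e3]
      have hst' : pvInv (l ++ [r]) (pvBStep st c) := by
        rw [hbs]
        refine ⟨?_, pvIsMQ_step 1 (by omega) l r st.m1 h1,
          pvIsMQ_step 2 (by omega) l r st.m2 h2, pvIsMQ_step 3 (by omega) l r st.m3 h3⟩
        intro x
        show (st.d.insert r (st.d.getD r 0 + 1)).getD x 0 = _
        rw [PySem.Dict.getD_insert]
        split
        next heq =>
          have hx : x = r := by omega
          rw [hx, hd]
          have : (l ++ [r]).count r = l.count r + 1 := by simp [List.count_append]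
          rw [this]; push_cast; ring
        next hne =>
          have hx : ¬ x = r := by omega
          rw [hd]
          have h0 : List.count x [r] = 0 := List.count_eq_zero.mpr (by simp [hx])
          have : (l ++ [r]).count x = l.count x := by
            rw [List.count_append, h0]
            omega
          rw [this]
      obtain ⟨ha, hb⟩ := ih (l ++ [r]) _ hst'
      constructor
      · rw [hr, List.foldl_cons,
          show l ++ r :: pvRanksOf cs = (l ++ [r]) ++ pvRanksOf cs by simp]
        exact ha
      · rw [List.foldl_cons, hb, hbs]
        simp [hj]

theorem pv_foldl_max_le (L : List Int) (a : Int) (h : ∀ r ∈ L, r - 5 ≤ a) :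
    L.foldl (fun b r => max b (r - 5)) a = a := by
  induction L generalizing a with
  | nil => rfl
  | cons x t ih =>
    rw [List.foldl_cons, max_eq_left (h x (by simp))]
    exact ih a (fun r hr => h r (by simp [hr]))

theorem pv_foldl_max_eq (L : List Int) (a x : Int) (hx : x ∈ L) (hmax : ∀ y ∈ L, y ≤ x)
    (ha : a ≤ x - 5) : L.foldl (fun b r => max b (r - 5)) a = x - 5 := by
  induction L generalizing a with
  | nil => simp at hx
  | cons h t ih =>
    rw [List.foldl_cons]
    by_cases hxh : x = h
    · subst hxh
      rw [max_eq_right ha]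
      exact pv_foldl_max_le t (x - 5) (fun r hr => by have := hmax r (by simp [hr]); omega)
    · have hxt : x ∈ t := by rcases List.mem_cons.mp hx with h' | h' <;> [exact absurd h' hxh; exact h']
      exact ih _ hxt (fun y hy => hmax y (List.mem_cons_of_mem _ hy))
        (by have := hmax h (by simp); omega)

-- the common final step: A's match on the descending filtered keys equals B's score of
-- the multiplicity maxima, given the count characterizations of the two thresholds
def pvScore (mT mP : Option Int) : Int :=
  match mT with
  | some t => 10 + t - 2
  | none =>
    match mP with
    | some p => if p ≥ 6 then p - 5 else 0
    | none => 0

theorem pv_main (ranks : List Int) (jokers : Int) (k3 k2 : Nat)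
    (mT mP : Option Int)
    (hT : pvIsMQ k3 ranks mT) (hP : pvIsMQ k2 ranks mP)
    (hTiff : ∀ r ∈ ranks, ((PySem.Dict.counter ranks).getD r 0 + jokers ≥ 3) ↔ k3 ≤ ranks.count r)
    (hPiff : ∀ r ∈ ranks, ((PySem.Dict.counter ranks).getD r 0 + jokers ≥ 2) ↔ k2 ≤ ranks.count r) :
    (match (PySem.List.sorted (PySem.Dict.counter ranks).keys (fun x => x) true).filter
        (fun r => decide ((PySem.Dict.counter ranks).getD r 0 + jokers ≥ 3)) with
     | t :: _ => 10 + (t - 2)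
     | [] => ((PySem.List.sorted (PySem.Dict.counter ranks).keys (fun x => x) true).filter
          (fun r => decide ((PySem.Dict.counter ranks).getD r 0 + jokers ≥ 2 ∧ r ≥ 6))).foldl
          (fun b r => max b (r - 5)) 0)
    = pvScore mT mP := by
  set ks := PySem.List.sorted (PySem.Dict.counter ranks).keys (fun x => x) true with hksdef
  have hmemks : ∀ x : Int, x ∈ ks ↔ x ∈ ranks := by
    intro x
    rw [hksdef, PySem.List.mem_sorted, PySem.Dict.keys_counter, PySem.Set.mem_ofList]
  cases mT with
  | some v =>
    obtain ⟨hvl, hvc, hvmax⟩ := hT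
    have hvf : v ∈ ks.filter (fun r => decide ((PySem.Dict.counter ranks).getD r 0 + jokers ≥ 3)) := by
      rw [List.mem_filter]
      exact ⟨(hmemks v).mpr hvl, decide_eq_true ((hTiff v hvl).mpr hvc)⟩
    cases hf : ks.filter (fun r => decide ((PySem.Dict.counter ranks).getD r 0 + jokers ≥ 3)) with
    | nil => rw [hf] at hvf; simp at hvf
    | cons t rest =>
      have htf : t ∈ ks.filter (fun r => decide ((PySem.Dict.counter ranks).getD r 0 + jokers ≥ 3)) := by
        rw [hf]; simp
      have htl : t ∈ ranks := (hmemks t).mp (List.mem_filter.mp htf).1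
      have htc : k3 ≤ ranks.count t :=
        (hTiff t htl).mp (of_decide_eq_true (List.mem_filter.mp htf).2)
      have htv : t ≤ v := hvmax t htl htc
      have hvt : v ≤ t := by
        have hpw : (ks.filter (fun r => decide ((PySem.Dict.counter ranks).getD r 0 + jokers ≥ 3))).Pairwise
            (fun a b : Int => b ≤ a) :=
          (PySem.List.sorted_pairwise_rev (PySem.Dict.counter ranks).keys (fun x => x)).filter _
        rw [hf, List.pairwise_cons] at hpw
        rw [hf] at hvf
        rcases List.mem_cons.mp hvf with h' | h'
        · omega
        · exact hpw.1 v h'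
      have : t = v := le_antisymm htv hvt
      subst this
      simp only [pvScore]
      ring
  | none =>
    have hfnil : ks.filter (fun r => decide ((PySem.Dict.counter ranks).getD r 0 + jokers ≥ 3)) = [] := by
      rw [List.filter_eq_nil_iff]
      intro x hxks hxp
      have hxl : x ∈ ranks := (hmemks x).mp hxks
      have := (hTiff x hxl).mp (of_decide_eq_true hxp)
      exact absurd this (by have := hT x hxl; omega)
    rw [hfnil]
    cases mP with
    | none =>
      have : ks.filter (fun r => decide ((PySem.Dict.counter ranks).getD r 0 + jokers ≥ 2 ∧ r ≥ 6)) = [] := by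
        rw [List.filter_eq_nil_iff]
        intro x hxks hxp
        have hxl : x ∈ ranks := (hmemks x).mp hxks
        have := (hPiff x hxl).mp (of_decide_eq_true hxp).1
        exact absurd this (by have := hP x hxl; omega)
      rw [this]
      rfl
    | some p =>
      obtain ⟨hpl, hpc, hpmax⟩ := hP
      simp only [pvScore]
      by_cases hp6 : p ≥ 6
      · rw [if_pos hp6]
        apply pv_foldl_max_eq
        · rw [List.mem_filter]
          exact ⟨(hmemks p).mpr hpl, decide_eq_true ⟨(hPiff p hpl).mpr hpc, hp6⟩⟩
        · intro y hy
          rw [List.mem_filter] at hy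
          have hyl : y ∈ ranks := (hmemks y).mp hy.1
          exact hpmax y hyl ((hPiff y hyl).mp (of_decide_eq_true hy.2).1)
        · omega
      · rw [if_neg hp6]
        have : ks.filter (fun r => decide ((PySem.Dict.counter ranks).getD r 0 + jokers ≥ 2 ∧ r ≥ 6)) = [] := by
          rw [List.filter_eq_nil_iff]
          intro x hxks hxp
          have hxl : x ∈ ranks := (hmemks x).mp hxks
          obtain ⟨hc, h6⟩ := of_decide_eq_true hxp
          have := hpmax x hxl ((hPiff x hxl).mp hc)
          omega
        rw [this]
        rfl

theorem get_top_royalty_spec_aux (cards : List String) :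
    get_top_royalty cards = get_top_royalty_alt cards := by
  unfold get_top_royalty
  dsimp only
  rw [PySem.List.foldl_prod_mk
    (f := fun s1 c => if pvIsJoker c then s1 else s1 ++ [RANK_VALUES.getD (pvCard0 c) 0])
    (g := fun (j : Int) c => if pvIsJoker c then j + 1 else j)]
  have hranks : (cards.foldl (fun s c => if pvIsJoker c then s else s ++ [RANK_VALUES.getD (pvCard0 c) 0]) ([] : List Int)) = pvRanksOf cards := by
    have hfn : (fun (s : List Int) c => if pvIsJoker c then s else s ++ [RANK_VALUES.getD (pvCard0 c) 0])
        = (fun (s : List Int) c => if (!pvIsJoker c) = true then s ++ [RANK_VALUES.getD (pvCard0 c) 0] else s) := by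
      funext s c; cases pvIsJoker c <;> simp
    rw [hfn, PySem.List.foldl_append_if]
    simp [pvRanksOf]
  have hjokA : (cards.foldl (fun j c => if pvIsJoker c then j + 1 else j) (0 : Int)) = (cards.countP pvIsJoker : Int) := by
    rw [PySem.List.foldl_if_add_one]
    simp
  simp only [hranks, hjokA]
  rw [pvA_loop_eq]
  -- B side: the loop invariant at the end of the fold
  have hinit : pvInv [] (⟨PySem.Dict.empty, none, none, none, 0⟩ : PvBSt) := by
    exact ⟨fun r => by simp [PySem.Dict.getD_empty], by simp [pvIsMQ], by simp [pvIsMQ], by simp [pvIsMQ]⟩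
  obtain ⟨⟨_, h1, h2, h3⟩, hjok⟩ :=
    pvB_fold cards [] ⟨PySem.Dict.empty, none, none, none, 0⟩ hinit
  simp only [List.nil_append] at h1 h2 h3
  have hjok' : (cards.foldl pvBStep ⟨PySem.Dict.empty, none, none, none, 0⟩).jok
      = (cards.countP pvIsJoker : Int) := by rw [hjok]; simp
  unfold get_top_royalty_alt
  dsimp only
  rw [hjok']
  have hJ0 : (0 : Int) ≤ (cards.countP pvIsJoker : Int) := Int.natCast_nonneg _
  set J : Int := (cards.countP pvIsJoker : Int) with hJdef
  set ranks := pvRanksOf cards with hrdef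
  set st := cards.foldl pvBStep (⟨PySem.Dict.empty, none, none, none, 0⟩ : PvBSt) with hstdef
  have hcnt : ∀ r ∈ ranks, (0 : Nat) < ranks.count r := fun r hr => List.count_pos_iff.mpr hr
  by_cases hc2 : J ≥ 2
  · simp only [if_pos hc2, if_pos (show J ≥ 1 by omega)]
    refine ((pv_main ranks J 1 1 st.m1 st.m1 h1 h1 ?_ ?_).trans
      (by cases st.m1 <;> rfl)) <;>
      · intro r hrm
        rw [PySem.Dict.getD_counter]
        have := hcnt r hrm
        constructor <;> intro <;> omega
  · by_cases hc1 : J = 1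
    · simp only [if_neg hc2, if_pos hc1, if_pos (show J ≥ 1 by omega)]
      refine ((pv_main ranks J 2 1 st.m2 st.m1 h2 h1 ?_ ?_).trans
        (by cases st.m2 <;> cases st.m1 <;> rfl)) <;>
        · intro r hrm
          rw [PySem.Dict.getD_counter]
          have := hcnt r hrm
          constructor <;> intro <;> omega
    · have hJz : J = 0 := by omega
      simp only [if_neg hc2, if_neg hc1, if_neg (show ¬ J ≥ 1 by omega)]
      refine ((pv_main ranks J 3 2 st.m3 st.m2 h3 h2 ?_ ?_).trans
        (by cases st.m3 <;> cases st.m2 <;> rfl)) <;>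
        · intro r hrm
          rw [PySem.Dict.getD_counter]
          have := hcnt r hrm
          constructor <;> intro <;> omega

-- ===== VERDICT (by name: the statement is the Claim_ definition above) =====
theorem get_top_royalty_spec : Claim_equal_get_top_royalty := by
  intro cards _ _
  unfold Spec_get_top_royalty
  exact get_top_royalty_spec_aux cards
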